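-- pv_equiv track=rewrite | github.com/tkoz0/random-minecraft | shape_generation/mc_shapes.py | filled_circle
-- ===== SOURCE A (Python) =====
-- def filled_circle(d):
--     assert type(d) == int and d > 0
--     if d % 2 == 0: # even, centered at block corner
--         R = d//2
--         # 1 quarter, r*r grid to be duplicated 4x
--         # block r,c center is offset r+0.5,c+0.5 from circle center
--         # (r+0.5)**2 + (c+0.5)**2 < R**2
--         # r**2 + r + c**2 + c + 0.5 < R**2
--         # 0.5 can be eliminated r,c,R are integers
--         Q = [[r*r + r + c*c + c < R*R for c in range(R)] for r in range(R)]
--         H = [row[::-1] + row for row in Q] # mirror horizontally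
--         return [row[:] for row in H[::-1]] + H
--     else: # odd, centered at block center
--         R = (d+1)//2
--         # 1 quarter, including the vertical and horizontal diameters
--         # the vertical and horizontal diameters are not duplicated
--         # radius is R-0.5
--         # block r,c center is offset r,c from circle center
--         # r**2 + c**2 < (R-0.5)**2 = R**2 - R + 0.25
--         # 0.25 should be changed to 1 since r,c,R are integers
--         # or equivalently use <= R**2 - R
--         Q = [[r*r + c*c <= R*R - R for c in range(R)] for r in range(R)]
--         H = [row[1:][::-1] + row for row in Q] # mirror horizontally
--         return [row[:] for row in H[1:][::-1]] + H
-- ===== SOURCE B (Python) =====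
-- def filled_circle(d):
--     assert type(d) == int and d > 0
--     if d % 2 == 0:  # even, centered at block corner
--         R = d // 2
--         RR = R * R
--         # quadratic term of each full-grid index, reflected into its quarter coordinate
--         q = [(i - R) * (i - R) + (i - R) if i >= R else (R - 1 - i) * (R - 1 - i) + (R - 1 - i)
--              for i in range(d)]
--         return [[qi + qj < RR for qj in q] for qi in q]
--     else:  # odd, centered at block center
--         R = (d + 1) // 2
--         T = R * R - R
--         q = [abs(i - (R - 1)) ** 2 for i in range(d)]
--         return [[qi + qj <= T for qj in q] for qi in q]
-- ===== Notes on version B (the rewrite author's own statement) =====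
-- stated objective: simpler
-- what changed: B computes every cell of the full d-by-d grid directly in one comprehension over a precomputed per-index quadratic-term list (reflecting each row/column index into its quarter coordinate), instead of A's build-a-quarter grid then mirror it with slice/reverse/concatenation passes.
import Mathlib
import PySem

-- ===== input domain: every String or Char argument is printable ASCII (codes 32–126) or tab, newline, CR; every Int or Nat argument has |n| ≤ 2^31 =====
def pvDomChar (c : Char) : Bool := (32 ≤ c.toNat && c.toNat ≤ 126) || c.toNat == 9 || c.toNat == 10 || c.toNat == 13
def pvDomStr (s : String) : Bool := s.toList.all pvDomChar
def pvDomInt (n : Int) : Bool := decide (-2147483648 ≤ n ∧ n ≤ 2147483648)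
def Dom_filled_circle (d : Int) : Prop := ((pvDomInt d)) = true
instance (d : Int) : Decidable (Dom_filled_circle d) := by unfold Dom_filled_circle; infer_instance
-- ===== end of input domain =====

-- B computes every cell of the full d×d grid directly (reflecting each index into its
-- quarter coordinate) instead of A's build-a-quarter-then-mirror slicing; same O(d^2) cost.

-- ===== PORT A =====
-- row[::-1] is ported as List.reverse (exact: PySem.List.slice?_none_none_neg_one);
-- row[1:] as PySem.List.slice row (some 1) none; row[:] as PySem.List.slice row none none.
def filled_circle (d : Int) : List (List Bool) :=
  -- assert d > 0 is Pre_filled_circle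
  if PySem.Int.mod d 2 = 0 then
    let R := PySem.Int.floordiv d 2
    let Q := (PySem.List.pyRange 0 R 1).map (fun r =>
      (PySem.List.pyRange 0 R 1).map (fun c => decide (r*r + r + c*c + c < R*R)))
    let H := Q.map (fun row => row.reverse ++ row)
    (H.reverse.map (fun row => PySem.List.slice row none none)) ++ H
  else
    let R := PySem.Int.floordiv (d + 1) 2
    let Q := (PySem.List.pyRange 0 R 1).map (fun r =>
      (PySem.List.pyRange 0 R 1).map (fun c => decide (r*r + c*c ≤ R*R - R)))
    let H := Q.map (fun row => (PySem.List.slice row (some 1) none).reverse ++ row)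
    ((PySem.List.slice H (some 1) none).reverse.map (fun row => PySem.List.slice row none none)) ++ H

-- ===== PORT B =====
def filled_circle_alt (d : Int) : List (List Bool) :=
  if PySem.Int.mod d 2 = 0 then
    let R := PySem.Int.floordiv d 2
    let RR := R * R
    let q := (PySem.List.pyRange 0 d 1).map (fun i =>
      if R ≤ i then (i - R) * (i - R) + (i - R) else (R - 1 - i) * (R - 1 - i) + (R - 1 - i))
    q.map (fun qi => q.map (fun qj => decide (qi + qj < RR)))
  else
    let R := PySem.Int.floordiv (d + 1) 2
    let T := R * R - R
    let q := (PySem.List.pyRange 0 d 1).map (fun i => |i - (R - 1)| ^ 2)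
    q.map (fun qi => q.map (fun qj => decide (qi + qj ≤ T)))

-- ===== PRECONDITION & SPEC =====
-- Pre_: the Python assert requires d > 0 (A raises AssertionError otherwise).
def Pre_filled_circle (d : Int) : Prop := 0 < d
instance (d : Int) : Decidable (Pre_filled_circle d) := by unfold Pre_filled_circle; infer_instance
def pvWitness_filled_circle : Int := (4)

def Spec_filled_circle (d : Int) (out : List (List Bool)) : Prop := out = filled_circle_alt d
instance (d : Int) (out : List (List Bool)) : Decidable (Spec_filled_circle d out) := by unfold Spec_filled_circle; infer_instance

-- ===== CLAIM (what is proved, stated in full; the proofs are below) =====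
def Claim_equal_filled_circle : Prop := ∀ (d : Int), Dom_filled_circle d → Pre_filled_circle d → Spec_filled_circle d (filled_circle d)

-- ===== LEMMAS AND PROOFS =====

lemma map_range_reverse {α : Type} (g : Nat → α) (n : Nat) :
    ((List.range n).map g).reverse = (List.range n).map (fun k => g (n - 1 - k)) := by
  apply List.ext_getElem (by simp)
  intro i h1 h2
  simp [List.getElem_reverse]

-- mirrored quarter-row equals the directly computed full row, even case
lemma mirror_even {α : Type} (g : Int → α) (n : Nat) :
    ((List.range n).map (fun k : Nat => g (k : Int))).reverse
      ++ (List.range n).map (fun k : Nat => g (k : Int))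
    = (List.range (n + n)).map
        (fun k : Nat => g (if (n : Int) ≤ (k : Int) then (k : Int) - n else (n : Int) - 1 - k)) := by
  rw [List.range_add, List.map_append, map_range_reverse, List.map_map]
  congr 1
  · apply List.map_congr_left
    intro k hk
    simp only [List.mem_range] at hk
    rw [if_neg (by omega)]
    congr 1
    omega
  · apply List.map_congr_left
    intro k hk
    simp only [List.mem_range] at hk
    simp only [Function.comp_apply]
    rw [if_pos (by push_cast; omega)]
    congr 1
    push_cast
    ring

-- mirrored quarter-row (shared diameter not duplicated) equals the directly computed full row, odd case
lemma mirror_odd {α : Type} (g : Int → α) (n : Nat) :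
    (((List.range n).map (fun k : Nat => g (k : Int))).tail).reverse
      ++ (List.range n).map (fun k : Nat => g (k : Int))
    = (List.range ((n - 1) + n)).map (fun k : Nat => g |(k : Int) - ((n : Int) - 1)|) := by
  cases n with
  | zero => simp
  | succ m =>
    have htail : ((List.range (m+1)).map (fun k : Nat => g (k : Int))).tail
        = (List.range m).map (fun k : Nat => g ((k : Int) + 1)) := by
      rw [List.range_succ_eq_map, List.map_cons, List.tail_cons, List.map_map]
      apply List.map_congr_left
      intro k _
      simp only [Function.comp_apply, Nat.succ_eq_add_one]
      push_cast
      ring_nf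
    rw [htail, map_range_reverse]
    have hsplit : (m + 1 - 1) + (m + 1) = m + (m + 1) := by omega
    rw [hsplit]
    conv_rhs => rw [List.range_add]
    rw [List.map_append, List.map_map]
    congr 1
    · apply List.map_congr_left
      intro k hk
      simp only [List.mem_range] at hk
      congr 1
      rw [abs_of_nonpos (by push_cast; omega)]
      omega
    · apply List.map_congr_left
      intro k hk
      simp only [List.mem_range] at hk
      simp only [Function.comp_apply]
      congr 1
      rw [abs_of_nonneg (by push_cast; omega)]
      push_cast
      ring

-- ===== VERDICT (by name: the statement is the Claim_ definition above) =====
theorem filled_circle_spec : Claim_equal_filled_circle := by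
  intro d _ hpre
  unfold Spec_filled_circle filled_circle filled_circle_alt
  have hpre' : 0 < d := hpre
  have h2 : (0:Int) < 2 := by norm_num
  by_cases h : PySem.Int.mod d 2 = 0
  · -- even case
    rw [if_pos h, if_pos h]
    have hmod : d % 2 = 0 := by rw [← PySem.Int.mod_eq_emod_of_pos h2]; exact h
    have hRe : PySem.Int.floordiv d 2 = d / 2 := PySem.Int.floordiv_eq_ediv_of_pos h2
    obtain ⟨n, hR, hd⟩ : ∃ n : Nat, PySem.Int.floordiv d 2 = (n : Int) ∧ d = ((n + n : Nat) : Int) :=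
      ⟨(d / 2).toNat, by rw [hRe]; omega, by push_cast; omega⟩
    rw [hR]
    simp only [hd, PySem.List.pyRange_zero_nat, PySem.List.slice_none_none,
      List.map_map, Function.comp_def, List.map_id']
    rw [mirror_even (fun r : Int =>
      ((List.range n).map (fun j : Nat => decide (r*r + r + (j:Int)*(j:Int) + (j:Int) < (n:Int)*(n:Int)))).reverse
        ++ (List.range n).map (fun j : Nat => decide (r*r + r + (j:Int)*(j:Int) + (j:Int) < (n:Int)*(n:Int)))) n]
    apply List.map_congr_left
    intro k _
    rw [mirror_even (fun c : Int =>
      decide ((if (n:Int) ≤ (k:Int) then (k:Int) - n else (n:Int) - 1 - k) *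
                (if (n:Int) ≤ (k:Int) then (k:Int) - n else (n:Int) - 1 - k) +
              (if (n:Int) ≤ (k:Int) then (k:Int) - n else (n:Int) - 1 - k) +
              c*c + c < (n:Int)*(n:Int))) n]
    apply List.map_congr_left
    intro j _
    split_ifs <;> rw [add_assoc]
  · -- odd case
    rw [if_neg h, if_neg h]
    have hmod : d % 2 = 1 := by
      have hme := PySem.Int.mod_eq_emod_of_pos h2 (a := d)
      rw [hme] at h
      omega
    have hRe : PySem.Int.floordiv (d + 1) 2 = (d + 1) / 2 := PySem.Int.floordiv_eq_ediv_of_pos h2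
    obtain ⟨n, hR, hd⟩ : ∃ n : Nat, PySem.Int.floordiv (d + 1) 2 = (n : Int) ∧ d = (((n - 1) + n : Nat) : Int) :=
      ⟨((d + 1) / 2).toNat, by rw [hRe]; omega, by omega⟩
    rw [hR]
    simp only [hd, PySem.List.pyRange_zero_nat, PySem.List.slice_none_none,
      PySem.List.slice_from_one, List.map_map, Function.comp_def, List.map_id']
    rw [mirror_odd (fun r : Int =>
      (((List.range n).map (fun j : Nat => decide (r*r + (j:Int)*(j:Int) ≤ (n:Int)*(n:Int) - n))).tail).reverse
        ++ (List.range n).map (fun j : Nat => decide (r*r + (j:Int)*(j:Int) ≤ (n:Int)*(n:Int) - n))) n]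
    apply List.map_congr_left
    intro k _
    rw [mirror_odd (fun c : Int =>
      decide (|(k:Int) - ((n:Int) - 1)| * |(k:Int) - ((n:Int) - 1)| + c*c ≤ (n:Int)*(n:Int) - n)) n]
    apply List.map_congr_left
    intro j _
    rw [pow_two, pow_two]
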